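-- pv_equiv track=rewrite | github.com/joaogabrielnobrega/ProgIF | ProgRedes/Lista_Revisao/questao_1.py | webMask
-- ===== SOURCE A (Python) =====
-- def binToDec(bine: str) -> str:
--     '''
--     Transforma um numero binario recebido, como string, em seu equivalente em decimal, tambem como string.
--     '''
--     if not isinstance(bine, str):
--         return False
--     dec = 0
--     weigth = range(len(bine) - 1, -1, -1)
--     for i in range(len(bine)):
--         dec += int(bine[i]) * (2 ** weigth[i])
--     return str(dec)
--
-- def webMask(mask: int) -> list:
--     '''
--     Transforma uma mascara de sub-rede CIDR em seu formato binario
--     '''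
--     if not isinstance(mask, int):
--         return False
--     mask_bin = ''
--     mask_bin += '1' * (mask)
--     mask_bin += '0' * (32 - mask)
--
--     oct_mask = [mask_bin[i: i + 8] for i in range(0, 32, 8)]
--     mask_bin = '.'.join(oct_mask)
--     mask_dec = '.'.join([binToDec(i) for i in oct_mask])
--     return mask_bin, mask_dec, oct_mask
-- ===== SOURCE B (Python) =====
-- def webMask(mask: int) -> list:
--     '''
--     Transforma uma mascara de sub-rede CIDR em seu formato binario
--     '''
--     if not isinstance(mask, int):
--         return False
--     n = max(0, min(mask, 32))
--     val = (1 << 32) - (1 << (32 - n))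
--     octets = [(val >> (24 - 8 * k)) & 0xFF for k in range(4)]
--     oct_mask = [format(o, '08b') for o in octets]
--     return '.'.join(oct_mask), '.'.join(str(o) for o in octets), oct_mask
-- ===== Notes on version B (the rewrite author's own statement) =====
-- stated objective: idiomatic
-- what changed: Replaces A's ones/zeros string concatenation, slicing, and per-octet digit-loop binary-to-decimal reconversion by computing the mask's integer value with shifts and extracting each octet with bit operations and zero-padded binary formatting.
import Mathlib
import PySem

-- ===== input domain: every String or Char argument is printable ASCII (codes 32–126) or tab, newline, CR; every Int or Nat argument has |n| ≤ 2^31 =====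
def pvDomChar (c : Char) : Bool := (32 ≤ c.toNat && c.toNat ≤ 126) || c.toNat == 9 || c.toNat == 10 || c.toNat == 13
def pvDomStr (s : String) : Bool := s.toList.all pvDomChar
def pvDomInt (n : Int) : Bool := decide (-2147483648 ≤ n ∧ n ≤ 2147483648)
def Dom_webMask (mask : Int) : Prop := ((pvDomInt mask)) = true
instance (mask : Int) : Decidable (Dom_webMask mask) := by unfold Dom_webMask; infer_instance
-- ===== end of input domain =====

set_option maxHeartbeats 2000000


-- B replaces A's string building + per-octet binary-to-decimal reconversion by integer
-- bit arithmetic on the 32-bit mask value (objective: alternative/idiomatic).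

-- ===== PORT A =====
-- int(bine[i]) is ported via ofStr?; the index i is always in range and the character always a
-- binary digit on every call webMask makes, so the .getD 0 defaults are never taken.
-- 2 ** weigth[i]: the exponent is always ≥ 0 here, so Int power on .toNat is exact.
def binToDec (bine : String) : String :=
  let cs := bine.toList
  let n : Int := cs.length
  let weigth := PySem.List.pyRange (n - 1) (-1) (-1)
  let dec := (PySem.List.pyRange 0 n 1).foldl
    (fun dec i =>
      dec + ((PySem.Int.ofStr? (String.ofList [PySem.List.pyGetD cs i ' '])).getD 0)
              * 2 ^ (PySem.List.pyGetD weigth i 0).toNat) 0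
  PySem.Int.toStr dec

def webMask (mask : Int) : String × String × List String :=
  let maskBin : List Char :=
    List.replicate mask.toNat '1' ++ List.replicate (32 - mask).toNat '0'
  let octMask : List String :=
    (PySem.List.pyRange 0 32 8).map
      (fun i => String.ofList (PySem.List.slice maskBin (some i) (some (i + 8))))
  let maskBinStr := PySem.Str.join "." octMask
  let maskDec := PySem.Str.join "." (octMask.map binToDec)
  (maskBinStr, maskDec, octMask)

-- ===== PORT B =====
-- '>>' and '& 0xFF' are ported as floor division by 2^s and mod 256 — exact for Python ints
-- (here val ≥ 0 and 24 - 8*k ≥ 0); format(o, '08b') is zfill (toBin o) 8.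
def webMask_alt (mask : Int) : String × String × List String :=
  let n := max 0 (min mask 32)
  let val : Int := 2 ^ (32 : Nat) - 2 ^ (32 - n).toNat
  let octets := (PySem.List.pyRange 0 4 1).map
    (fun k => PySem.Int.mod (PySem.Int.floordiv val (2 ^ (24 - 8 * k).toNat)) 256)
  let octMask := octets.map (fun o => PySem.Str.zfill (PySem.Int.toBin o) 8)
  (PySem.Str.join "." octMask,
   PySem.Str.join "." (octets.map PySem.Int.toStr),
   octMask)

-- ===== PRECONDITION & SPEC =====
def Spec_webMask (mask : Int) (out : String × String × List String) : Prop := out = webMask_alt mask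
instance (mask : Int) (out : String × String × List String) : Decidable (Spec_webMask mask out) := by unfold Spec_webMask; infer_instance

-- ===== CLAIM (what is proved, stated in full; the proofs are below) =====
def Claim_equal_webMask : Prop := ∀ (mask : Int), Dom_webMask mask → Spec_webMask mask (webMask mask)

-- ===== LEMMAS AND PROOFS =====

-- A's maskBin string, truncated to its first 32 characters, only depends on the clamp of mask to [0, 32].
lemma take32_replicate (mask : Int) :
    (List.replicate mask.toNat '1' ++ List.replicate (32 - mask).toNat '0').take 32
      = (List.replicate (max 0 (min mask 32)).toNat '1'
          ++ List.replicate (32 - max 0 (min mask 32)).toNat '0').take 32 := by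
  by_cases h : mask ≤ 0
  · have h1 : mask.toNat = 0 := Int.toNat_of_nonpos h
    have h2 : max 0 (min mask 32) = 0 := by omega
    have h3 : (32 - mask).toNat = 32 + (-mask).toNat := by omega
    simp [h1, h2, h3, List.take_replicate]
  · by_cases h' : mask ≤ 32
    · have : max 0 (min mask 32) = mask := by omega
      rw [this]
    · have h2 : max 0 (min mask 32) = 32 := by omega
      have h3 : mask.toNat = 32 + (mask - 32).toNat := by omega
      simp [h2, h3, List.take_replicate, List.replicate_add,
            List.take_append_of_le_length]

-- a slice xs[i:i+8] with i+8 ≤ 32 only reads the first 32 elements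
lemma slice_eq_of_take32 {xs ys : List Char} (h : xs.take 32 = ys.take 32)
    (i : Int) (hi : 0 ≤ i) (h8 : i.toNat + 8 ≤ 32) :
    PySem.List.slice xs (some i) (some (i + 8)) = PySem.List.slice ys (some i) (some (i + 8)) := by
  have hb : (0 : Int) ≤ i + 8 := by omega
  rw [PySem.List.slice_toNat xs hi hb, PySem.List.slice_toNat ys hi hb]
  have ht : (i + 8).toNat - i.toNat = 8 := by omega
  have hx : (xs.drop i.toNat).take 8 = ((xs.take 32).drop i.toNat).take 8 := by
    rw [List.drop_take, List.take_take]
    congr 1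
    omega
  have hy : (ys.drop i.toNat).take 8 = ((ys.take 32).drop i.toNat).take 8 := by
    rw [List.drop_take, List.take_take]
    congr 1
    omega
  rw [ht, hx, hy, h]

lemma webMask_clamp (mask : Int) : webMask mask = webMask (max 0 (min mask 32)) := by
  have ht := take32_replicate mask
  have hrange : PySem.List.pyRange 0 32 8 = [0, 8, 16, 24] := by decide
  have e0 := slice_eq_of_take32 ht 0 (by decide) (by decide)
  have e8 := slice_eq_of_take32 ht 8 (by decide) (by decide)
  have e16 := slice_eq_of_take32 ht 16 (by decide) (by decide)
  have e24 := slice_eq_of_take32 ht 24 (by decide) (by decide)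
  simp only [webMask, hrange, List.map_cons, List.map_nil, e0, e8, e16, e24]

lemma webMask_alt_clamp (mask : Int) : webMask_alt mask = webMask_alt (max 0 (min mask 32)) := by
  unfold webMask_alt
  have : max 0 (min (max 0 (min mask 32)) 32) = max 0 (min mask 32) := by omega
  rw [this]

-- ===== VERDICT (by name: the statement is the Claim_ definition above) =====
theorem webMask_spec : Claim_equal_webMask := by
  intro mask _
  unfold Spec_webMask
  rw [webMask_clamp mask, webMask_alt_clamp mask]
  set c := max 0 (min mask 32) with hc
  have h0 : 0 ≤ c := by omega
  have h32 : c ≤ 32 := by omega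
  clear_value c
  interval_cases c <;> decide
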